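/-
  SMOKE TESTS OF S3's STATEMENTS (Vorbis/Spec/Codebook.lean, Vorbis/Spec/Codebook/*.lean):
    * the assertions of a segmented function CHAIN: the composition unit is provable by `ReachVia.trans` alone;
    * NON-VACUITY in shape: a caller's facts give a callee's precondition, for call sites inside this group, into S2's and the
      pilot's contracts, and from the callers' invariant (`Separated`, `CodebooksOK`) into `BookApart`.
  (The compositions of compute_sorted_huffman and codebook_decode_deinterleave_repeat: Vorbis/Spec/Codebook/SortedHuffmanTest.lean,
  DeintTest.lean.)
-/
import Vorbis.Spec.Units.codebook_decode_scalar_raw_COMPOSITION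
namespace Vorbis.Spec.Test
open X86 X86.User Asan

/-! ### Composition -/

/-- The composition unit of codebook_decode_scalar_raw is pure chaining: segment 1's three exit assertions ARE the entry
assertions of segments 2, 3, 4, and segment 4 ends in the contract's `Returned`. -/
example : Vorbis.Spec.codebook_decode_scalar_raw_COMPOSITION.Statement := by
  intro Lay _ μ _ u₀ h1 h2 h3 h4 others frames Blk len e ret he hpre
  refine (h1 others frames Blk len ret e he hpre).trans ?_
  intro v hv
  rcases hv with hb | hl | hx
  · exact (h2 others frames Blk len ret e v hb).trans (fun w hw => h4 others frames Blk len ret e w hw)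
  · exact (h3 others frames Blk len ret e v hl).trans (fun w hw => h4 others frames Blk len ret e w hw)
  · exact h4 others frames Blk len ret e v hx

/-! ### Into the contracts of other groups -/

section callees
variable {others : List Obj} {frames : List (Nat × FrameLayout)} {Blk : Block → Prop} {len : Nat} {e : State}

/-- A decode through a book may call S2's prep_huffman at its entry state: `BookPre.reader` IS prep_huffman's precondition. -/
example (h : BookPre others frames Blk len e) : (prep_huffman.spec others frames Blk len).pre e :=
  h.reader

/-- … and the pilot's `error` (`*f` inside ONE live object: `ReaderEnv.obj`). -/
example (h : BookPre others frames Blk len e) : (error.spec others frames).pre e :=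
  ⟨h.reader.shadow, h.reader.env.obj⟩

/-- codebook_decode, codebook_decode_step, residue_decode pass `f` and `c` on unchanged: their first clause is the precondition of
codebook_decode_start / codebook_decode_scalar_raw. -/
example (h : (codebook_decode.spec others frames Blk len).pre e) : (codebook_decode_start.spec others frames Blk len).pre e :=
  h.1

example (h : (codebook_decode_start.spec others frames Blk len).pre e) :
    (codebook_decode_scalar_raw.spec others frames Blk len).pre e :=
  h

/-- compute_sorted_huffman → include_in_sort (the pilot's contract asks for `*c` inside ONE live object). -/
example (h : SortedHuffmanPre others frames Blk e) : (include_in_sort.spec others frames).pre e :=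
  ⟨h.shadow, h.bookLive⟩

/-- compute_sorted_huffman → qsort: `n = se ≥ 2` records of `w = 4` bytes at `sorted_codewords`, inside one live object. -/
example (h : SortedHuffmanPre others frames Blk e) (s : State) (hsh : ShadowPre others frames s)
    (hrdi : (s.reg .rdi).toNat = Codebook.sorted_codewords e.mem (e.reg .rdi).toNat)
    (hrsi : (s.reg .rsi).toNat = (Codebook.sorted_entries e.mem (e.reg .rdi).toNat).toNat)
    (hrdx : (s.reg .rdx).toNat = 4) (hrcx : s.reg .rcx = L.uint32_compare.entry) :
    (qsort.spec others frames L.uint32_compare.entry 4).pre s := by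
  refine ⟨hsh, Or.inr ⟨hrcx, hrdx, by decide, ?_, ?_⟩⟩
  · have h1 := h.K1.ent_lt
    have h2 := h.K2.se_le
    rw [hrsi]
    omega
  · rw [hrdi, hrsi]
    exact h.scLive

end callees

/-! ### Inside the group -/

section inside
variable {others : List Obj} {frames : List (Nat × FrameLayout)} {Blk : Block → Prop} {e : State}

/-- compute_codewords → add_entry, dense: the word `codewords[k]`, `k < n`, is a live site (K3t / K3n), at the address of
`add_entry.denseCell`. -/
example (h : CodewordsPre others frames Blk e) (hs : Codebook.sparse e.mem (e.reg .rdi).toNat = 0) (k : Nat)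
    (hk : k < argU32 (e.reg .rdx)) :
    Site (Live (stackObjs frames ++ others)) (Codebook.codewords e.mem (e.reg .rdi).toNat + 4 * k) 4 := by
  have hn := h.n_eq
  refine h.K3t.site_codewords h.live h.K2 k ?_ rfl
  rw [Codebook.N_dense hs]
  omega

/-- compute_codewords → add_entry, sparse: `values[m]`, `m < se`, is a live site, at the address of `add_entry.valCell`. -/
example (h : CodewordsPre others frames Blk e) (hs : Codebook.sparse e.mem (e.reg .rdi).toNat ≠ 0) (m : Nat)
    (hm : (m : Int) < Codebook.sorted_entries e.mem (e.reg .rdi).toNat) :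
    Site (Live (stackObjs frames ++ others)) ((e.reg .rcx).toNat + 4 * m) 4 := by
  obtain ⟨_, hv⟩ := h.sparse hs
  apply Site.of_blk h.live hv
  · simp only []
    omega
  · simp only []
    omega
  · omega

/-- residue_decode → codebook_decode (rtype ≠ 0): `min(n − k, d)` floats at `offset + k`. -/
example {mem : Mem} {f c t off n k m : Nat} (hw : FloatWindow others frames mem f c (t + 4 * off) (4 * n)) (hm : 1 ≤ m) (hkm : k + m ≤ n) :
    FloatWindow others frames mem f c (t + 4 * (off + k)) (4 * m) :=
  hw.sub (by omega) (by omega) (by omega)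

/-- residue_decode → codebook_decode_step (rtype = 0): the coarse strided window at `offset + k`, with `step = n / d`. -/
example {mem : Mem} {f c t off n k d step len' : Nat} (hw : FloatWindow others frames mem f c (t + 4 * off) (4 * n)) (hd1 : 1 ≤ d)
    (hl : len' ≤ d) (hl1 : 1 ≤ len') (hd : step * d ≤ n) (hk : k < step) :
    FloatWindow others frames mem f c (t + 4 * (off + k)) (stepBytes len' step) := by
  have hfit := stepBytes_fits hd1 hl hd hk
  refine hw.sub (by omega) (by omega) ?_
  unfold stepBytes
  split <;> omega

end inside

/-! ### From the callers' invariant -/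

/-- **`BookApart` of every codebook follows from the decoder invariant**: CONFIG and the separation clause (`Separated.obj` for the
codebooks block, for the `sorted_values` block and for the `codeword_lengths` block of book `i`: all three are among
`ConfigOK.Reads`). `Separated.bookApart` (Vorbis/Spec/Common.lean). -/
example {Blk : Block → Prop} {mem : Mem} {f i : Nat} (hsep : Separated Blk mem f) (h : ConfigOK Blk mem f)
    (hi : (i : Int) < stb_vorbis.codebook_count mem f) : BookApart mem f (stb_vorbis.codebooks_at mem f i) :=
  hsep.bookApart h i hi

end Vorbis.Spec.Test
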